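-- pv_equiv track=rewrite | github.com/Jannchie/pymahjong | core/to_bin.py | get_seq_int
-- ===== SOURCE A (Python) =====
-- def get_bin_4(num: int) -> int:
--     if num == 1:
--         return 0b00
--     elif num == 2:
--         return 0b01
--     elif num == 3:
--         return 0b10
--     elif num == 4:
--         return 0b11
--
-- def get_bin_3(num: int) -> int:
--     if num == 0:
--         return 0b00
--     elif num == 1:
--         return 0b01
--     elif num == 2:
--         return 0b10
--
-- def get_seq_int(seq):
--     n = 0
--     res = 0b0
--     for sub_seq in seq:
--         for idx, el in enumerate(sub_seq):
--             if idx % 2 == 0: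
--                 res = res << 2
--                 res += get_bin_4(el)
--                 n += 2
--             else:
--                 res = res << 2
--                 res += get_bin_3(el)
--                 n += 2
--         res = res << 2
--         n += 2
--         res += 0b00
--     res += 0b11
--     res <<= 56 - n
--     return res
-- ===== SOURCE B (Python) =====
-- def get_bin_4(num: int) -> int:
--     if num == 1:
--         return 0b00
--     elif num == 2:
--         return 0b01
--     elif num == 3:
--         return 0b10
--     elif num == 4:
--         return 0b11
--
-- def get_bin_3(num: int) -> int:
--     if num == 0:
--         return 0b00
--     elif num == 1:
--         return 0b01
--     elif num == 2:
--         return 0b10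
--
-- def get_seq_int(seq):
--     codes = []
--     for sub_seq in seq:
--         for idx, el in enumerate(sub_seq):
--             codes.append(get_bin_4(el) if idx % 2 == 0 else get_bin_3(el))
--         codes.append(0)
--     res = sum(code << (56 - 2 * (i + 1)) for i, code in enumerate(codes))
--     return res + (3 << (56 - 2 * len(codes)))
-- ===== Notes on version B (the rewrite author's own statement) =====
-- stated objective: alternative
-- what changed: B first flattens the nested input into one list of 2-bit codes (delimiter 0 after each subsequence) and then assembles the integer by placing each code at its absolute bit offset with a positional-weight sum, instead of A's incremental shift-and-add accumulator threaded through nested loops.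
import Mathlib
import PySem

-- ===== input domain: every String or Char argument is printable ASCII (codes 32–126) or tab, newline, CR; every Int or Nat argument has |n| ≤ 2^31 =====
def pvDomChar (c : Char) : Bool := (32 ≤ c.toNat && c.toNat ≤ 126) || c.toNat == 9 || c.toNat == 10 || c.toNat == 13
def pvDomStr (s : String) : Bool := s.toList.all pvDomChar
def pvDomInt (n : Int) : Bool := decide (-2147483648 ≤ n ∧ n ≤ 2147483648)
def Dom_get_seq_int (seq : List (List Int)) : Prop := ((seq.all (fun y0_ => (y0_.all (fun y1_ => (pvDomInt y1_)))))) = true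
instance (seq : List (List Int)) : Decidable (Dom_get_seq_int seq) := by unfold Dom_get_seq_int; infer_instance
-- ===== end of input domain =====

-- B changes the decomposition: flatten to a flat code list, then a positional-weight sum at
-- absolute offsets, instead of A's incremental shift-and-add accumulator (objective: alternative).

-- ===== PORT A =====
-- Python get_bin_4 returns None off 1..4 (the caller's 'res +=' then raises TypeError);
-- the port returns none there, and Pre_ excludes such inputs.
def get_bin_4 (num : Int) : Option Int :=
  if num = 1 then some 0
  else if num = 2 then some 1
  else if num = 3 then some 2
  else if num = 4 then some 3
  else none

def get_bin_3 (num : Int) : Option Int :=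
  if num = 0 then some 0
  else if num = 1 then some 1
  else if num = 2 then some 2
  else none

-- body of A's inner loop: state (res, n), none = Python has raised (excluded by Pre_);
-- 'res << 2' is res * 4 (shift by the literal 2).
def pvStepA (st : Option (Int × Int)) (p : Int × Int) : Option (Int × Int) :=
  match st with
  | none => none
  | some (res, n) =>
    if p.1 % 2 = 0 then
      match get_bin_4 p.2 with
      | some b => some (res * 4 + b, n + 2)
      | none => none
    else
      match get_bin_3 p.2 with
      | some b => some (res * 4 + b, n + 2)
      | none => none

-- body of A's outer loop: inner loop over enumerate(sub_seq), then the delimiter step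
def pvSubA (st : Option (Int × Int)) (sub_seq : List Int) : Option (Int × Int) :=
  match (PySem.List.enumerate sub_seq 0).foldl pvStepA st with
  | none => none
  | some (res, n) => some (res * 4, n + 2)

def get_seq_int (seq : List (List Int)) : Int :=
  match seq.foldl pvSubA (some (0, 0)) with
  | none => 0  -- Python raised TypeError earlier; excluded by Pre_
  | some (res, n) =>
    if n ≤ 56 then (res + 3) * 2 ^ ((56 : Int) - n).toNat
    else 0     -- Python: ValueError (negative shift count); excluded by Pre_

-- ===== PORT B =====
-- Source B's conditional expression choosing the 2-bit code for position idx
def pvCodeB (p : Int × Int) : Option Int :=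
  if p.1 % 2 = 0 then get_bin_4 p.2 else get_bin_3 p.2

-- codes may contain none (Python None → TypeError at the shift) and for a too-long input the
-- shift amount goes negative (Python ValueError, .toNat clamps); both are excluded by Pre_.
def get_seq_int_alt (seq : List (List Int)) : Int :=
  let codes : List (Option Int) :=
    seq.foldl (fun codes sub_seq =>
      (PySem.List.enumerate sub_seq 0).foldl (fun codes p => codes ++ [pvCodeB p]) codes
        ++ [some 0]) []
  ((PySem.List.enumerate codes 0).map
      (fun q => q.2.getD 0 * 2 ^ ((56 : Int) - 2 * (q.1 + 1)).toNat)).sum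
    + 3 * 2 ^ ((56 : Int) - 2 * (codes.length : Int)).toNat

-- ===== PRECONDITION & SPEC =====
-- Pre_ = exactly the inputs where Python A returns: every even-position element in 1..4 and
-- odd-position element in 0..2 (else get_bin_* returns None and 'res +=' raises TypeError),
-- and total packed width ≤ 56 bits (else 'res <<= 56 - n' raises ValueError).
def Pre_get_seq_int (seq : List (List Int)) : Prop :=
  (∀ sub ∈ seq, ∀ p ∈ PySem.List.enumerate sub 0,
      if p.1 % 2 = 0 then 1 ≤ p.2 ∧ p.2 ≤ 4 else 0 ≤ p.2 ∧ p.2 ≤ 2)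
  ∧ (seq.map (fun sub => sub.length + 1)).sum ≤ 28
instance (seq : List (List Int)) : Decidable (Pre_get_seq_int seq) := by
  unfold Pre_get_seq_int; infer_instance

def pvWitness_get_seq_int : List (List Int) := [[1, 2], [3]]

def Spec_get_seq_int (seq : List (List Int)) (out : Int) : Prop := out = get_seq_int_alt seq
instance (seq : List (List Int)) (out : Int) : Decidable (Spec_get_seq_int seq out) := by unfold Spec_get_seq_int; infer_instance

-- ===== CLAIM (what is proved, stated in full; the proofs are below) =====
def Claim_equal_get_seq_int : Prop := ∀ (seq : List (List Int)), Dom_get_seq_int seq → Pre_get_seq_int seq → Spec_get_seq_int seq (get_seq_int seq)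

-- ===== LEMMAS AND PROOFS =====

-- Horner fold: the value A's shift-and-add accumulates over a flat code stream
def pvHF (vs : List Int) (r : Int) : Int := vs.foldl (fun r c => r * 4 + c) r

-- the flat code stream (values; 0 = delimiter) of a nested input
def pvVs (seq : List (List Int)) : List Int :=
  seq.flatMap (fun sub =>
    (PySem.List.enumerate sub 0).map (fun p => (pvCodeB p).getD 0) ++ [0])

theorem pvHF_append (xs ys : List Int) (r : Int) :
    pvHF (xs ++ ys) r = pvHF ys (pvHF xs r) := by
  simp [pvHF, List.foldl_append]

theorem pvCodeB_isSome (p : Int × Int)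
    (h : if p.1 % 2 = 0 then 1 ≤ p.2 ∧ p.2 ≤ 4 else 0 ≤ p.2 ∧ p.2 ≤ 2) :
    (pvCodeB p).isSome := by
  unfold pvCodeB get_bin_4 get_bin_3
  split_ifs at h ⊢ <;> simp_all <;> omega

theorem pvStepA_some (res n : Int) (p : Int × Int) (h : (pvCodeB p).isSome) :
    pvStepA (some (res, n)) p = some (res * 4 + (pvCodeB p).getD 0, n + 2) := by
  unfold pvStepA pvCodeB at *
  by_cases hp : p.1 % 2 = 0 <;> simp only [hp, if_pos, if_neg, not_false_iff] at *
  · cases hb : get_bin_4 p.2 <;> simp [hb] at h ⊢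
  · cases hb : get_bin_3 p.2 <;> simp [hb] at h ⊢

theorem pvInner (ps : List (Int × Int)) :
    ∀ (res n : Int), (∀ p ∈ ps, (pvCodeB p).isSome) →
      ps.foldl pvStepA (some (res, n)) =
        some (pvHF (ps.map (fun p => (pvCodeB p).getD 0)) res, n + 2 * ps.length) := by
  induction ps with
  | nil => intro res n _; simp [pvHF]
  | cons p t ih =>
    intro res n h
    have hp : (pvCodeB p).isSome := h p (List.mem_cons_self ..)
    rw [List.foldl_cons, pvStepA_some res n p hp,
        ih _ _ (fun q hq => h q (List.mem_cons_of_mem _ hq))]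
    simp only [List.map_cons, pvHF, List.foldl_cons, List.length_cons, Option.some.injEq,
      Prod.mk.injEq]
    exact ⟨by simp, by push_cast; ring⟩

theorem pvOuter (seq : List (List Int)) :
    ∀ (res n : Int),
      (∀ sub ∈ seq, ∀ p ∈ PySem.List.enumerate sub 0, (pvCodeB p).isSome) →
      seq.foldl pvSubA (some (res, n)) =
        some (pvHF (pvVs seq) res, n + 2 * (pvVs seq).length) := by
  induction seq with
  | nil => intro res n _; simp [pvVs, pvHF]
  | cons sub t ih =>
    intro res n h
    have hsub := pvInner (PySem.List.enumerate sub 0) res n (h sub (List.mem_cons_self ..))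
    have hsub2 : pvSubA (some (res, n)) sub =
        some (pvHF ((PySem.List.enumerate sub 0).map (fun p => (pvCodeB p).getD 0) ++ [0]) res,
              n + 2 * ((PySem.List.enumerate sub 0).length : Int) + 2) := by
      unfold pvSubA
      rw [hsub, pvHF_append]
      simp [pvHF]
    rw [List.foldl_cons, hsub2, ih _ _ (fun s hs => h s (List.mem_cons_of_mem _ hs))]
    have hvs : pvVs (sub :: t) =
        ((PySem.List.enumerate sub 0).map (fun p => (pvCodeB p).getD 0) ++ [0]) ++ pvVs t := by
      simp [pvVs]
    rw [hvs]
    simp only [Option.some.injEq, Prod.mk.injEq, List.length_append, List.length_map,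
      List.length_cons, List.length_nil]
    refine ⟨by simp [pvHF], ?_⟩
    push_cast
    ring

-- dropping the Option layer under the positional sum
theorem pvSumGetD (os : List (Option Int)) :
    ∀ (s : Int),
      ((PySem.List.enumerate os s).map
          (fun q => q.2.getD 0 * 2 ^ ((56 : Int) - 2 * (q.1 + 1)).toNat)).sum =
      ((PySem.List.enumerate (os.map (fun o => o.getD 0)) s).map
          (fun q => q.2 * 2 ^ ((56 : Int) - 2 * (q.1 + 1)).toNat)).sum := by
  induction os with
  | nil => intro s; simp
  | cons o t ih => intro s; simp [PySem.List.enumerate_cons, ih (s + 1)]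

-- Horner value times the remaining width = positional-weight sum
theorem pvHornerSum (vs : List Int) :
    ∀ (s : Nat) (r : Int), s + vs.length ≤ 28 →
      pvHF vs r * 4 ^ (28 - (s + vs.length)) =
        r * 4 ^ (28 - s) +
          ((PySem.List.enumerate vs (s : Int)).map
              (fun q => q.2 * 2 ^ ((56 : Int) - 2 * (q.1 + 1)).toNat)).sum := by
  induction vs with
  | nil => intro s r _; simp [pvHF]
  | cons c t ih =>
    intro s r h
    have h' : (s + 1) + t.length ≤ 28 := by simpa [Nat.add_comm, Nat.add_left_comm] using h
    have hs : s ≤ 27 := by omega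
    have e1 : 28 - (s + (c :: t).length) = 28 - ((s + 1) + t.length) := by
      simp [List.length_cons]; omega
    have e2 : pvHF (c :: t) r = pvHF t (r * 4 + c) := rfl
    rw [e2, e1, ih (s + 1) (r * 4 + c) h']
    have ecast : ((s : Int) + 1) = ((s + 1 : Nat) : Int) := by push_cast; ring
    have etn : (((56 : Int) - 2 * ((s : Int) + 1))).toNat = 2 * (27 - s) := by omega
    have epow : (4 : Int) ^ (28 - s) = 4 * 4 ^ (28 - (s + 1)) := by
      have : 28 - s = (28 - (s + 1)) + 1 := by omega
      rw [this, pow_succ]; ring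
    have epow2 : (2 : Int) ^ (2 * (27 - s)) = 4 ^ (28 - (s + 1)) := by
      have h4 : (4 : Int) = 2 ^ 2 := by norm_num
      rw [h4, ← pow_mul]
      congr 1
      omega
    simp only [PySem.List.enumerate_cons, List.map_cons, List.sum_cons]
    rw [etn, epow2, epow, ecast]
    ring

-- B's codes accumulator, flattened
theorem pvCodesEq (seq : List (List Int)) :
    seq.foldl (fun codes sub_seq =>
        (PySem.List.enumerate sub_seq 0).foldl (fun codes p => codes ++ [pvCodeB p]) codes
          ++ [some 0]) [] =
      seq.flatMap (fun sub => (PySem.List.enumerate sub 0).map pvCodeB ++ [some 0]) := by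
  have hbody : ∀ (acc : List (Option Int)) (sub : List Int),
      (PySem.List.enumerate sub 0).foldl (fun codes p => codes ++ [pvCodeB p]) acc
          ++ [some 0] =
        acc ++ ((PySem.List.enumerate sub 0).map pvCodeB ++ [some 0]) := by
    intro acc sub
    rw [PySem.List.foldl_append_singleton_eq_map, List.append_assoc]
  calc seq.foldl (fun codes sub_seq =>
          (PySem.List.enumerate sub_seq 0).foldl (fun codes p => codes ++ [pvCodeB p]) codes
            ++ [some 0]) []
      = seq.foldl (fun codes sub_seq =>
          codes ++ ((PySem.List.enumerate sub_seq 0).map pvCodeB ++ [some 0])) [] := by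
        exact PySem.List.foldl_congr_mem _ _ _ _ (fun acc a _ => hbody acc a)
    _ = _ := by
        rw [PySem.List.foldl_append_eq_flatMap]; simp

theorem pvCodes_map_getD (seq : List (List Int)) :
    (seq.flatMap (fun sub => (PySem.List.enumerate sub 0).map pvCodeB ++ [some 0])).map
        (fun o => o.getD 0) = pvVs seq := by
  simp [pvVs, List.map_flatMap, Function.comp_def]

theorem pvVs_length (seq : List (List Int)) :
    (pvVs seq).length = (seq.map (fun sub => sub.length + 1)).sum := by
  simp [pvVs, List.length_flatMap]

-- ===== VERDICT (by name: the statement is the Claim_ definition above) =====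
theorem get_seq_int_spec : Claim_equal_get_seq_int := by
  intro seq _ hpre
  obtain ⟨hval, hlen⟩ := hpre
  have hsome : ∀ sub ∈ seq, ∀ p ∈ PySem.List.enumerate sub 0, (pvCodeB p).isSome :=
    fun sub hs p hp => pvCodeB_isSome p (hval sub hs p hp)
  set vs := pvVs seq with hvs
  have hL : vs.length ≤ 28 := by rw [hvs, pvVs_length]; exact hlen
  -- A's value
  have hA : get_seq_int seq = (pvHF vs 0 + 3) * 2 ^ ((56 : Int) - 2 * (vs.length : Int)).toNat := by
    unfold get_seq_int
    rw [pvOuter seq 0 0 hsome]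
    have hn : (0 : Int) + 2 * (vs.length : Int) ≤ 56 := by
      have : (vs.length : Int) ≤ 28 := by exact_mod_cast hL
      omega
    simp only [← hvs, hn, if_pos]
    congr 2
    omega
  -- B's value
  have hB : get_seq_int_alt seq =
      ((PySem.List.enumerate vs (0 : Int)).map
          (fun q => q.2 * 2 ^ ((56 : Int) - 2 * (q.1 + 1)).toNat)).sum
        + 3 * 2 ^ ((56 : Int) - 2 * (vs.length : Int)).toNat := by
    simp only [get_seq_int_alt]
    rw [pvCodesEq, pvSumGetD, pvCodes_map_getD, ← hvs]
    congr 3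
    rw [hvs, ← pvCodes_map_getD seq, List.length_map]
  -- join via the Horner/positional-sum identity
  have hkey := pvHornerSum vs 0 0 (by simpa using hL)
  simp only [Nat.cast_zero, zero_mul, zero_add] at hkey
  have htn : (((56 : Int) - 2 * (vs.length : Int))).toNat = 2 * (28 - vs.length) := by omega
  have hpowe : (2 : Int) ^ (2 * (28 - vs.length)) = 4 ^ (28 - vs.length) := by
    have h4 : (4 : Int) = 2 ^ 2 := by norm_num
    rw [h4, ← pow_mul]
  show get_seq_int seq = get_seq_int_alt seq
  rw [hA, hB, htn, hpowe, ← hkey]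
  ring
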